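-- pv_equiv track=rewrite | github.com/wilywork/trabalho2_IA | main.py | calcularAtaquesPotenciais
-- ===== SOURCE A (Python) =====
-- def calcularAtaquesPotenciais(tabuleiro, colunaAtual, linhaAtual):
--     ataques = 0
--     tamanhoTabuleiro = len(tabuleiro)
--     for colunaFutura in range(colunaAtual + 1, tamanhoTabuleiro):
--         for linhaFutura in range(tamanhoTabuleiro):
--             if not posicaoSegura(tabuleiro, colunaFutura, linhaFutura):
--                 ataques += 1
--     return ataques
--
-- def posicaoSegura(tabuleiro, coluna, linha):
--     for i in range(coluna):
--         if tabuleiro[i] is None: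
--             continue
--         if tabuleiro[i] == linha or abs(tabuleiro[i] - linha) == abs(i - coluna):
--             return False
--     return True
--
-- tamanhoTabuleiro = 8
-- ===== SOURCE B (Python) =====
-- def calcularAtaquesPotenciais(tabuleiro, colunaAtual, linhaAtual):
--     n = len(tabuleiro)
--     total = 0
--     for c in range(colunaAtual + 1, n):
--         attacked = [False] * n
--         for i in range(c):
--             v = tabuleiro[i]
--             if v is None:
--                 continue
--             d = c - i
--             for r in (v, v + d, v - d):
--                 if 0 <= r < n:
--                     attacked[r] = True
--         total += sum(attacked)
--     return total
-- ===== Notes on version B (the rewrite author's own statement) =====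
-- stated objective: faster
-- what changed: Instead of re-running the O(n) posicaoSegura scan for every cell of every future column, B makes one pass per future column over the placed queens, marking each queen's attacked row and two diagonal rows in a boolean array, and sums the marks.
import Mathlib
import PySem

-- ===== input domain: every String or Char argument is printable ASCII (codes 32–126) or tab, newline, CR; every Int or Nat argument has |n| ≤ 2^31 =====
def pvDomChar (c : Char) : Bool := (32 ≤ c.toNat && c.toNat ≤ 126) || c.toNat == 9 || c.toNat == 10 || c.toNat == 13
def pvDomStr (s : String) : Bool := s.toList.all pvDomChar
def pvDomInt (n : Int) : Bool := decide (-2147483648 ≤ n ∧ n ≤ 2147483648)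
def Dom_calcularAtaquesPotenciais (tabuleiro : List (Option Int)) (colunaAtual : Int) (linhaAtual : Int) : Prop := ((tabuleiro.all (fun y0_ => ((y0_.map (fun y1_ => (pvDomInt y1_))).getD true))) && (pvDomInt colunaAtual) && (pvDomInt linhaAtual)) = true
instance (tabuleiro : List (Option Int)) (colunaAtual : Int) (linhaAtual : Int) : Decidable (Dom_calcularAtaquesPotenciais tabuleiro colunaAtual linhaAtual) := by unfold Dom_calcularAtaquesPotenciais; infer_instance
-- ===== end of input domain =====

-- B replaces A's per-cell O(n) safety scan by one per-column pass that marks the attacked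
-- rows of that column in a boolean array (O(n^2) instead of O(n^3)); same return value.

-- ===== PORT A =====
-- helper: posicaoSegura, literal port (the for-loop with early `return False` is `all`;
-- tabuleiro[i] is always in range at A's call sites, so pyGetD's default is never used)
def posicaoSegura (tabuleiro : List (Option Int)) (coluna : Int) (linha : Int) : Bool :=
  (PySem.List.pyRange 0 coluna 1).all (fun i =>
    match PySem.List.pyGetD tabuleiro i none with
    | none => true
    | some v => !(decide (v = linha) || decide ((v - linha).natAbs = (i - coluna).natAbs)))

def calcularAtaquesPotenciais (tabuleiro : List (Option Int)) (colunaAtual : Int) (linhaAtual : Int) : Int :=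
  let tamanhoTabuleiro : Int := tabuleiro.length
  (PySem.List.pyRange (colunaAtual + 1) tamanhoTabuleiro 1).foldl (fun ataques colunaFutura =>
    (PySem.List.pyRange 0 tamanhoTabuleiro 1).foldl (fun a linhaFutura =>
      if !(posicaoSegura tabuleiro colunaFutura linhaFutura) then a + 1 else a) ataques) 0

-- ===== PORT B =====
-- helper: `attacked[r] = True` guarded by `0 <= r < n`
def pvMark (n : Int) (att : List Bool) (r : Int) : List Bool :=
  if 0 ≤ r ∧ r < n then att.set r.toNat true else att

-- helper: body of B's inner loop (one placed queen marks its three attacked rows)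
def pvStep (tabuleiro : List (Option Int)) (c : Int) (att : List Bool) (i : Int) : List Bool :=
  match PySem.List.pyGetD tabuleiro i none with
  | none => att
  | some v => pvMark (tabuleiro.length : Int) (pvMark (tabuleiro.length : Int)
      (pvMark (tabuleiro.length : Int) att v) (v + (c - i))) (v - (c - i))

-- helper: the boolean array of rows attacked in column c (B's inner loop)
def pvColAttacked (tabuleiro : List (Option Int)) (c : Int) : List Bool :=
  (PySem.List.pyRange 0 c 1).foldl (pvStep tabuleiro c) (List.replicate tabuleiro.length false)

def calcularAtaquesPotenciais_alt (tabuleiro : List (Option Int)) (colunaAtual : Int) (linhaAtual : Int) : Int :=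
  (PySem.List.pyRange (colunaAtual + 1) (tabuleiro.length : Int) 1).foldl
    (fun total c => total + ((pvColAttacked tabuleiro c).countP id : Int)) 0

-- ===== PRECONDITION & SPEC =====
def Spec_calcularAtaquesPotenciais (tabuleiro : List (Option Int)) (colunaAtual : Int) (linhaAtual : Int) (out : Int) : Prop := out = calcularAtaquesPotenciais_alt tabuleiro colunaAtual linhaAtual
instance (tabuleiro : List (Option Int)) (colunaAtual : Int) (linhaAtual : Int) (out : Int) : Decidable (Spec_calcularAtaquesPotenciais tabuleiro colunaAtual linhaAtual out) := by unfold Spec_calcularAtaquesPotenciais; infer_instance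

-- ===== CLAIM (what is proved, stated in full; the proofs are below) =====
def Claim_equal_calcularAtaquesPotenciais : Prop := ∀ (tabuleiro : List (Option Int)) (colunaAtual : Int) (linhaAtual : Int), Dom_calcularAtaquesPotenciais tabuleiro colunaAtual linhaAtual → Spec_calcularAtaquesPotenciais tabuleiro colunaAtual linhaAtual (calcularAtaquesPotenciais tabuleiro colunaAtual linhaAtual)

-- ===== LEMMAS AND PROOFS =====

-- "queen in column i attacks cell (c, j)" — the common hit predicate of both programs
def pvHit (tabuleiro : List (Option Int)) (c : Int) (j : Nat) (i : Int) : Bool :=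
  match PySem.List.pyGetD tabuleiro i none with
  | none => false
  | some v => decide (v = (j : Int)) || decide ((v - (j : Int)).natAbs = (i - c).natAbs)

theorem pvMark_length (n : Int) (att : List Bool) (r : Int) :
    (pvMark n att r).length = att.length := by
  unfold pvMark; split_ifs <;> simp

theorem pvMark_getElem (n : Int) (att : List Bool) (r : Int) (j : Nat)
    (hj : j < att.length) (hjn : (j : Int) < n) :
    (pvMark n att r)[j]'(by rw [pvMark_length]; exact hj)
      = (att[j] || decide (r = (j : Int))) := by
  unfold pvMark
  by_cases h : 0 ≤ r ∧ r < n
  · simp only [if_pos h]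
    rw [List.getElem_set]
    by_cases hr : r = (j : Int)
    · have : r.toNat = j := by omega
      simp [hr]
    · have : r.toNat ≠ j := by omega
      simp [this, hr]
  · simp only [if_neg h]
    have : r ≠ (j : Int) := by omega
    simp [this]

theorem pvStep_none (tabuleiro : List (Option Int)) (c : Int) (att : List Bool) (i : Int)
    (hv : PySem.List.pyGetD tabuleiro i none = none) : pvStep tabuleiro c att i = att := by
  simp [pvStep, hv]

theorem pvStep_some (tabuleiro : List (Option Int)) (c : Int) (att : List Bool) (i : Int) (v : Int)
    (hv : PySem.List.pyGetD tabuleiro i none = some v) :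
    pvStep tabuleiro c att i = pvMark (tabuleiro.length : Int) (pvMark (tabuleiro.length : Int)
      (pvMark (tabuleiro.length : Int) att v) (v + (c - i))) (v - (c - i)) := by
  simp [pvStep, hv]

theorem pvStep_length (tabuleiro : List (Option Int)) (c : Int) (att : List Bool) (i : Int) :
    (pvStep tabuleiro c att i).length = att.length := by
  rcases hv : PySem.List.pyGetD tabuleiro i none with _ | v
  · rw [pvStep_none _ _ _ _ hv]
  · rw [pvStep_some _ _ _ _ _ hv]; simp [pvMark_length]

theorem pvFold_length (tabuleiro : List (Option Int)) (c : Int) (l : List Int) (att : List Bool) :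
    (l.foldl (pvStep tabuleiro c) att).length = att.length := by
  induction l generalizing att with
  | nil => rfl
  | cons i l ih => rw [List.foldl_cons, ih, pvStep_length]

theorem pvFold_getElem (tabuleiro : List (Option Int)) (c : Int) (l : List Int)
    (hl : ∀ i ∈ l, i < c) (att : List Bool) (j : Nat)
    (hj : j < att.length) (hjn : (j : Int) < (tabuleiro.length : Int)) :
    (l.foldl (pvStep tabuleiro c) att)[j]'(by rw [pvFold_length]; exact hj)
      = (att[j] || l.any (pvHit tabuleiro c j)) := by
  induction l generalizing att with
  | nil => simp
  | cons i l ih =>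
    have hic : i < c := hl i (List.mem_cons_self)
    have hl' : ∀ x ∈ l, x < c := fun x hx => hl x (List.mem_cons_of_mem _ hx)
    simp only [List.foldl_cons, List.any_cons]
    have hjs : j < (pvStep tabuleiro c att i).length := by rw [pvStep_length]; exact hj
    rw [ih hl' _ hjs]
    rcases hv : PySem.List.pyGetD tabuleiro i none with _ | v
    · rw [List.getElem_of_eq (pvStep_none tabuleiro c att i hv)]
      simp [pvHit, hv]
    · have hj1 : j < (pvMark (tabuleiro.length : Int) att v).length := by
        rw [pvMark_length]; exact hj
      have hj2 : j < (pvMark (tabuleiro.length : Int)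
          (pvMark (tabuleiro.length : Int) att v) (v + (c - i))).length := by
        rw [pvMark_length]; exact hj1
      have key : (pvStep tabuleiro c att i)[j]'hjs = (att[j] || pvHit tabuleiro c j i) := by
        rw [List.getElem_of_eq (pvStep_some tabuleiro c att i v hv)]
        rw [pvMark_getElem _ _ _ _ hj2 hjn, pvMark_getElem _ _ _ _ hj1 hjn,
            pvMark_getElem _ _ _ _ hj hjn]
        simp only [pvHit, hv]
        have : (decide (v = (j:Int)) || decide ((v - (j:Int)).natAbs = (i - c).natAbs))
            = (decide (v = (j:Int)) || decide (v + (c - i) = (j:Int)) || decide (v - (c - i) = (j:Int))) := by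
          by_cases h1 : v = (j:Int) <;> by_cases h2 : (v - (j:Int)).natAbs = (i - c).natAbs <;>
            by_cases h3 : v + (c - i) = (j:Int) <;> by_cases h4 : v - (c - i) = (j:Int) <;>
            simp [h1, h2, h3, h4] <;> omega
        cases att[j] <;> simp [this, Bool.or_assoc]
      rw [key, Bool.or_assoc]

theorem pvColAttacked_eq_map (tabuleiro : List (Option Int)) (c : Int) :
    pvColAttacked tabuleiro c
      = (List.range tabuleiro.length).map
          (fun j => (PySem.List.pyRange 0 c 1).any (pvHit tabuleiro c j)) := by
  apply List.ext_getElem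
  · rw [pvColAttacked, pvFold_length]; simp
  · intro j h1 h2
    have hlen : j < tabuleiro.length := by
      have := h1; rw [pvColAttacked, pvFold_length] at this; simpa using this
    simp only [pvColAttacked]
    rw [pvFold_getElem tabuleiro c _ (fun i hi => ((PySem.List.mem_pyRange_one).1 hi).2)
        _ j (by simpa using hlen) (by exact_mod_cast hlen)]
    simp

theorem pvNotSafe_eq_any (tabuleiro : List (Option Int)) (c : Int) (j : Nat) :
    (!(posicaoSegura tabuleiro c (j : Int)))
      = (PySem.List.pyRange 0 c 1).any (pvHit tabuleiro c j) := by
  unfold posicaoSegura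
  rw [List.all_eq_not_any_not, Bool.not_not]
  apply PySem.List.any_congr_mem
  intro i _
  rcases hv : PySem.List.pyGetD tabuleiro i none with _ | v <;> simp [pvHit, hv]

theorem pvCol_count (tabuleiro : List (Option Int)) (c : Int) (a : Int) :
    (PySem.List.pyRange 0 (tabuleiro.length : Int) 1).foldl (fun a linhaFutura =>
      if !(posicaoSegura tabuleiro c linhaFutura) then a + 1 else a) a
      = a + ((pvColAttacked tabuleiro c).countP id : Int) := by
  rw [PySem.List.foldl_if_add_one]
  congr 2
  rw [pvColAttacked_eq_map, List.countP_map, PySem.List.pyRange_zero_natCast,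
      List.countP_map]
  apply List.countP_congr
  intro j hj
  simp only [Function.comp]
  rw [pvNotSafe_eq_any]
  simp

-- ===== VERDICT (by name: the statement is the Claim_ definition above) =====
theorem calcularAtaquesPotenciais_spec : Claim_equal_calcularAtaquesPotenciais := by
  intro tabuleiro colunaAtual linhaAtual _
  unfold Spec_calcularAtaquesPotenciais calcularAtaquesPotenciais calcularAtaquesPotenciais_alt
  apply PySem.List.foldl_congr_mem
  intro acc c _
  exact pvCol_count tabuleiro c acc
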